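-- pv_equiv track=rewrite | github.com/wggraham/interview-prep | interviewbit/Backtracking/maximal-string2.py | solve3
-- ===== SOURCE A (Python) =====
-- def solve3(A, B):
--     def swap(s, i, j):
--         s1 = s[:i]
--         s2 = s[i + 1:j]
--         s3 = s[j + 1:]
--         return s1 + s[j] + s2 + s[i] + s3
--
--     def sswap(A, B, ans):
--         if B == 0:
--             return ans[0]
--         for i in range(len(A)):
--             for j in range(i + 1, len(A)):
--                 if A[j] > A[i]:
--                     temp = swap(A, i, j)
--                     if ans[0] < temp:
--                         ans[0] = temp
--                     sswap(temp, B - 1, ans)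
--
--     ans = [A]
--     sswap(A, B, ans)
--     return ans[0]
-- ===== SOURCE B (Python) =====
-- def solve3(A, B):
--     # Level-by-level BFS over distinct strings with a running maximum,
--     # instead of A's exhaustive DFS; one level per swap spent (a negative b,
--     # like A's recursion, never reaches 0: the search runs until no improving
--     # swap is left).
--     best = A
--     frontier = {A}
--     b = B
--     while b != 0 and frontier:
--         nxt = set()
--         for s in frontier:
--             n = len(s)
--             for i in range(n):
--                 for j in range(i + 1, n):
--                     if s[j] > s[i]:
--                         nxt.add(s[:i] + s[j] + s[i + 1:j] + s[i] + s[j + 1:])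
--         frontier = nxt
--         for s in nxt:
--             if best < s:
--                 best = s
--         b -= 1
--     return best
-- ===== Notes on version B (the rewrite author's own statement) =====
-- stated objective: alternative
-- what changed: A's exhaustive DFS over all improving-swap sequences (revisiting the same string once per path) is replaced by a level-by-level BFS that keeps each level as a set of distinct strings and a running maximum, so every distinct string is expanded at most once per level; intended as faster via deduplication (measured 1.46x at the largest size both finished, below the 1.5x bar, and both time out on the hardest inputs).
import Mathlib
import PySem

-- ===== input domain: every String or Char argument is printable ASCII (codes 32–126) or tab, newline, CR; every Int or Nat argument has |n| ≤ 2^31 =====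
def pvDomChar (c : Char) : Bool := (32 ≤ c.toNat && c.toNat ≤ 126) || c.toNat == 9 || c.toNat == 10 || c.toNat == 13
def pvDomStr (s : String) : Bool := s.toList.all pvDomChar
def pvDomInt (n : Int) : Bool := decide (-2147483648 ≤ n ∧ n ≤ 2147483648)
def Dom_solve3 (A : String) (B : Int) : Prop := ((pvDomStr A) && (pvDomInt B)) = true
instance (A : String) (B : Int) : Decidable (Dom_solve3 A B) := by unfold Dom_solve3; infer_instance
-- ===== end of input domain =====

-- B replaces A's exhaustive DFS over improving-swap sequences by a level-by-level BFS over
-- DISTINCT strings with a running maximum (objective: alternative — each distinct string is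
-- expanded once per level instead of once per DFS path).

-- ===== PORT A =====
-- swap(s, i, j): s[:i] + s[j] + s[i+1:j] + s[i] + s[j+1:]  (i, j always in range here, so
-- pyGetD with a dummy default is exact for s[i], s[j])
def pvSwapA (s : List Char) (i j : Int) : List Char :=
  let s1 := PySem.List.slice s none (some i)
  let s2 := PySem.List.slice s (some (i + 1)) (some j)
  let s3 := PySem.List.slice s (some (j + 1)) none
  s1 ++ [PySem.List.pyGetD s j ' '] ++ s2 ++ [PySem.List.pyGetD s i ' '] ++ s3

-- sswap(A, B, ans): the mutable one-cell list ans is threaded through and returned.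
-- fuel replaces the countdown B: `B == 0` is `fuel = 0`.
def pvSswapA (fuel : Nat) (s ans : List Char) : List Char :=
  match fuel with
  | 0 => ans
  | f + 1 =>
    (PySem.List.pyRange 0 (s.length : Int) 1).foldl (fun ans i =>
      (PySem.List.pyRange (i + 1) (s.length : Int) 1).foldl (fun ans j =>
        if PySem.List.pyGetD s j ' ' > PySem.List.pyGetD s i ' ' then
          let temp := pvSwapA s i j
          let ans := if ans < temp then temp else ans
          pvSswapA f temp ans
        else ans) ans) ans

-- fuel: B.toNat recursion levels for 0 ≤ B; for B < 0 Python's B-1 never reaches 0 and the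
-- recursion bottoms out when no improving swap is left — each improving swap strictly decreases
-- the number of ascending pairs, so the depth is < C(n,2)+1 ≤ n*n fuel (exact; a fuel guard only)
def solve3 (A : String) (B : Int) : String :=
  String.mk (pvSswapA (if B < 0 then A.toList.length * A.toList.length else B.toNat)
    A.toList A.toList)

-- ===== PORT B =====
-- one BFS level: every improving-swap successor of every frontier string, as a set
def pvStepB (frontier : PySem.Set (List Char)) : PySem.Set (List Char) :=
  frontier.foldl (fun nxt s =>
    (PySem.List.pyRange 0 (s.length : Int) 1).foldl (fun nxt i =>
      (PySem.List.pyRange (i + 1) (s.length : Int) 1).foldl (fun nxt j =>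
        if PySem.List.pyGetD s j ' ' > PySem.List.pyGetD s i ' ' then
          PySem.Set.add nxt (PySem.List.slice s none (some i) ++ [PySem.List.pyGetD s j ' ']
            ++ PySem.List.slice s (some (i + 1)) (some j) ++ [PySem.List.pyGetD s i ' ']
            ++ PySem.List.slice s (some (j + 1)) none)
        else nxt) nxt) nxt) PySem.Set.empty

-- while b != 0 and frontier: … ; b -= 1   (fuel replaces the countdown b; b != 0 is fuel ≠ 0)
def pvLoopB (fuel : Nat) (frontier : PySem.Set (List Char)) (best : List Char) : List Char :=
  match fuel with
  | 0 => best
  | f + 1 =>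
    if frontier.isEmpty then best
    else
      let nxt := pvStepB frontier
      let best := nxt.foldl (fun best s => if best < s then s else best) best
      pvLoopB f nxt best

-- fuel: B.toNat iterations for 0 ≤ B; for B < 0 the loop runs until the frontier is empty —
-- at most C(n,2)+1 ≤ n*n iterations (see the bound above), so n*n fuel is exact
def solve3_alt (A : String) (B : Int) : String :=
  String.mk (pvLoopB (if B < 0 then A.toList.length * A.toList.length else B.toNat)
    (PySem.Set.ofList [A.toList]) A.toList)

-- ===== PRECONDITION & SPEC =====
def Spec_solve3 (A : String) (B : Int) (out : String) : Prop := out = solve3_alt A B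
instance (A : String) (B : Int) (out : String) : Decidable (Spec_solve3 A B out) := by unfold Spec_solve3; infer_instance

-- ===== CLAIM (what is proved, stated in full; the proofs are below) =====
def Claim_equal_solve3 : Prop := ∀ (A : String) (B : Int), Dom_solve3 A B → Spec_solve3 A B (solve3 A B)

-- ===== LEMMAS AND PROOFS =====

-- `if a < t then t else a` is `max a t`
theorem pvIfLtEqMax (a t : List Char) : (if a < t then t else a) = max a t := by
  rcases lt_trichotomy a t with h | h | h <;> simp [h, le_of_lt]

-- the improving-swap successors of s, in A's (i, j) loop order
def pvSuccs (s : List Char) : List (List Char) :=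
  (PySem.List.pyRange 0 (s.length : Int) 1).flatMap (fun i =>
    (PySem.List.pyRange (i + 1) (s.length : Int) 1).flatMap (fun j =>
      if PySem.List.pyGetD s j ' ' > PySem.List.pyGetD s i ' ' then [pvSwapA s i j] else []))

-- maximum over the depth-≤ f improving-swap tree rooted at s (root included)
def pvMaxT : Nat → List Char → List Char
  | 0, s => s
  | f + 1, s => (pvSuccs s).foldl (fun a t => max a (pvMaxT f t)) s

-- a fold over (flatMap f) is the nested fold
theorem pvFoldlFlatMap {α β γ : Type} (l : List α) (f : α → List β) (g : γ → β → γ) (init : γ) :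
    (l.flatMap f).foldl g init = l.foldl (fun a x => (f x).foldl g a) init := by
  induction l generalizing init with
  | nil => rfl
  | cons x xs ih => simp [List.flatMap_cons, List.foldl_append, ih]

-- any fold over pvSuccs s is A's/B's nested i, j loop with that body
theorem pvFoldlSuccs {γ : Type} (s : List Char) (g : γ → List Char → γ) (init : γ) :
    (pvSuccs s).foldl g init =
    (PySem.List.pyRange 0 (s.length : Int) 1).foldl (fun a i =>
      (PySem.List.pyRange (i + 1) (s.length : Int) 1).foldl (fun a j =>
        if PySem.List.pyGetD s j ' ' > PySem.List.pyGetD s i ' ' then g a (pvSwapA s i j)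
        else a) a) init := by
  unfold pvSuccs
  rw [pvFoldlFlatMap]
  congr 1
  funext a i
  rw [pvFoldlFlatMap]
  congr 1
  funext a j
  split <;> simp

-- the single induction powering all max-fold reasoning
theorem pvFoldMax_le_iff {α β : Type} [LinearOrder α] (h : β → α) (l : List β) (a r : α) :
    l.foldl (fun x t => max x (h t)) a ≤ r ↔ a ≤ r ∧ ∀ t ∈ l, h t ≤ r := by
  induction l generalizing a with
  | nil => simp
  | cons x xs ih => simp [ih, and_assoc]

theorem pvLeFoldMax {α β : Type} [LinearOrder α] (h : β → α) (l : List β) (a : α) :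
    a ≤ l.foldl (fun x t => max x (h t)) a ∧ ∀ t ∈ l, h t ≤ l.foldl (fun x t => max x (h t)) a :=
  (pvFoldMax_le_iff h l a _).1 le_rfl

theorem pvFoldMax_pull {α β : Type} [LinearOrder α] (h : β → α) (l : List β) (x y : α) :
    l.foldl (fun a t => max a (h t)) (max x y) = max x (l.foldl (fun a t => max a (h t)) y) := by
  apply le_antisymm
  · rw [pvFoldMax_le_iff]
    exact ⟨max_le_max_left x (pvLeFoldMax h l y).1,
      fun t ht => le_max_of_le_right ((pvLeFoldMax h l y).2 t ht)⟩
  · apply max_le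
    · exact le_trans (le_max_left x y) (pvLeFoldMax h l _).1
    · rw [pvFoldMax_le_iff]
      exact ⟨le_trans (le_max_right x y) (pvLeFoldMax h l _).1,
        fun t ht => (pvLeFoldMax h l _).2 t ht⟩

theorem pvFoldMax_eq_of_mem_iff {α β : Type} [LinearOrder α] (h : β → α) (l₁ l₂ : List β) (a : α)
    (hm : ∀ x, x ∈ l₁ ↔ x ∈ l₂) :
    l₁.foldl (fun x t => max x (h t)) a = l₂.foldl (fun x t => max x (h t)) a := by
  apply le_antisymm <;> rw [pvFoldMax_le_iff]
  · exact ⟨(pvLeFoldMax h l₂ a).1, fun t ht => (pvLeFoldMax h l₂ a).2 t ((hm t).1 ht)⟩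
  · exact ⟨(pvLeFoldMax h l₁ a).1, fun t ht => (pvLeFoldMax h l₁ a).2 t ((hm t).2 ht)⟩

theorem pvFoldMax_absorb {α β : Type} [LinearOrder α] (g h : β → α) (l : List β) (b : α)
    (hgh : ∀ t ∈ l, g t ≤ h t) :
    l.foldl (fun a t => max a (h t)) (l.foldl (fun a t => max a (g t)) b) =
    l.foldl (fun a t => max a (h t)) b := by
  apply le_antisymm
  · rw [pvFoldMax_le_iff, pvFoldMax_le_iff]
    exact ⟨⟨(pvLeFoldMax h l b).1, fun t ht => le_trans (hgh t ht) ((pvLeFoldMax h l b).2 t ht)⟩,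
      fun t ht => (pvLeFoldMax h l b).2 t ht⟩
  · rw [pvFoldMax_le_iff]
    exact ⟨le_trans (pvLeFoldMax g l b).1 (pvLeFoldMax h l _).1,
      fun t ht => (pvLeFoldMax h l _).2 t ht⟩

theorem pvFoldMax_of_le {α β : Type} [LinearOrder α] (h : β → α) (l : List β) (a : α)
    (hle : ∀ t ∈ l, h t ≤ a) : l.foldl (fun x t => max x (h t)) a = a :=
  le_antisymm ((pvFoldMax_le_iff h l a a).2 ⟨le_rfl, hle⟩) (pvLeFoldMax h l a).1

theorem pvLeMaxT (f : Nat) (s : List Char) : s ≤ pvMaxT f s := by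
  cases f with
  | zero => exact le_rfl
  | succ f => exact (pvLeFoldMax (pvMaxT f) (pvSuccs s) s).1

-- characterisation of A's recursion: the threaded ans becomes max ans (subtree max)
theorem pvSswapA_eq (f : Nat) (s ans : List Char) (hs : s ≤ ans) :
    pvSswapA f s ans = max ans (pvMaxT f s) := by
  induction f generalizing s ans with
  | zero => exact (max_eq_left hs).symm
  | succ f ih =>
    have hbody : pvSswapA (f + 1) s ans =
        (pvSuccs s).foldl (fun a t => pvSswapA f t (if a < t then t else a)) ans := by
      rw [pvFoldlSuccs]
      rfl
    rw [hbody]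
    have hg : (fun (a t : List Char) => pvSswapA f t (if a < t then t else a)) =
        (fun a t => max a (pvMaxT f t)) := by
      funext a t
      rw [pvIfLtEqMax, ih t (max a t) (le_max_right a t), max_assoc,
        max_eq_right (pvLeMaxT f t)]
    rw [hg]
    show (pvSuccs s).foldl (fun a t => max a (pvMaxT f t)) ans = _
    rw [pvMaxT, ← pvFoldMax_pull, max_eq_left hs]

-- characterisation of one BFS level: the distinct successors of the whole frontier
theorem pvStepB_eq (frontier : PySem.Set (List Char)) :
    pvStepB frontier = PySem.Set.ofList (frontier.flatMap pvSuccs) := by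
  have h1 : pvStepB frontier =
      frontier.foldl (fun nxt s => (pvSuccs s).foldl PySem.Set.add nxt) PySem.Set.empty := by
    unfold pvStepB
    congr 1
    funext nxt s
    rw [pvFoldlSuccs]
    rfl
  rw [h1, ← pvFoldlFlatMap]
  rfl

-- flattening one tree level into the frontier's successor multiset
theorem pvFlatten (f : Nat) (fr : List (List Char)) (best : List Char)
    (hb : ∀ s ∈ fr, s ≤ best) :
    fr.foldl (fun a s => max a (pvMaxT (f + 1) s)) best =
    (fr.flatMap pvSuccs).foldl (fun a t => max a (pvMaxT f t)) best := by
  induction fr generalizing best with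
  | nil => rfl
  | cons s rest ih =>
    simp only [List.foldl_cons, List.flatMap_cons, List.foldl_append]
    have h1 : max best (pvMaxT (f + 1) s) = (pvSuccs s).foldl (fun a t => max a (pvMaxT f t)) best := by
      rw [pvMaxT, ← pvFoldMax_pull, max_eq_left (hb s (by simp))]
    rw [h1]
    exact ih _ (fun t ht => le_trans (hb t (by simp [ht]))
      (pvLeFoldMax (pvMaxT f) (pvSuccs s) best).1)

-- characterisation of B's loop
theorem pvLoopB_eq (f : Nat) (frontier : PySem.Set (List Char)) (best : List Char)
    (hb : ∀ s ∈ frontier, s ≤ best) :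
    pvLoopB f frontier best = frontier.foldl (fun a s => max a (pvMaxT f s)) best := by
  induction f generalizing frontier best with
  | zero =>
    exact (pvFoldMax_of_le (pvMaxT 0) frontier best hb).symm
  | succ f ih =>
    by_cases hfe : frontier = []
    · subst hfe; rfl
    · have hne : frontier.isEmpty = false := by simp [hfe]
      have hstep : pvLoopB (f + 1) frontier best =
          pvLoopB f (pvStepB frontier)
            ((pvStepB frontier).foldl (fun best s => if best < s then s else best) best) := by
        rw [pvLoopB, hne]
        rfl
      rw [hstep]
      have hmax2 : (fun (best s : List Char) => if best < s then s else best) =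
          (fun a t => max a (id t)) := by
        funext a t; rw [pvIfLtEqMax]; rfl
      rw [hmax2]
      set nxt := pvStepB frontier with hnxt
      have hb' : ∀ s ∈ nxt, s ≤ nxt.foldl (fun a t => max a (id t)) best :=
        fun s hs => (pvLeFoldMax id nxt best).2 s hs
      rw [ih nxt _ hb']
      rw [pvFoldMax_absorb id (pvMaxT f) nxt best (fun t _ => pvLeMaxT f t)]
      have hmem : ∀ x, x ∈ nxt ↔ x ∈ frontier.flatMap pvSuccs := by
        intro x
        rw [hnxt, pvStepB_eq]
        exact PySem.Set.mem_ofList _ _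
      rw [pvFoldMax_eq_of_mem_iff (pvMaxT f) nxt (frontier.flatMap pvSuccs) best hmem]
      exact (pvFlatten f frontier best hb).symm

-- ===== VERDICT (by name: the statement is the Claim_ definition above) =====
theorem solve3_spec : Claim_equal_solve3 := by
  intro A B _hdom
  unfold Spec_solve3 solve3 solve3_alt
  rw [pvSswapA_eq _ A.toList A.toList le_rfl]
  have hfr : PySem.Set.ofList [A.toList] = [A.toList] := rfl
  rw [hfr, pvLoopB_eq _ [A.toList] A.toList (by simp)]
  simp
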